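-- pv_equiv track=rewrite | github.com/merojosa/Memoria-Distribuida | interface.py | interpret_data
-- ===== SOURCE A (Python) =====
-- def interpret_data(sensor_id, team_id, page_data_list):
--     data_list = []
--     isInteger = True
--     for page in page_data_list:
--         #sensor_data = ""
--         #data_iter = 0
--         for data in page:
--             sensor_data = data
--             #if data_iter >= process_table[(sensor_id,team_id)].data_size:
--
--             if(isInteger):
--                 stringToAppend = '%i' + sensor_data
--                 isInteger = False
--             else:
--                 stringToAppend = '%f' + sensor_data
--                 isInteger = True
--
--             data_list.append(stringToAppend)
--                 #sensor_data = ""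
--                 #data_iter = 0
--
--     return data_list
-- ===== SOURCE B (Python) =====
-- def interpret_data(sensor_id, team_id, page_data_list):
--     flat = []
--     for page in page_data_list:
--         flat.extend(page)
--     out = []
--     i = 0
--     n = len(flat)
--     while i + 2 <= n:
--         out.append('%i' + flat[i])
--         out.append('%f' + flat[i + 1])
--         i += 2
--     if i < n:
--         out.append('%i' + flat[i])
--     return out
-- ===== Notes on version B (the rewrite author's own statement) =====
-- stated objective: alternative
-- what changed: Replaces the per-element isInteger toggle by pair-at-a-time processing: the pages are flattened once, then each loop step consumes TWO items and emits the '%i'/'%f' pair unconditionally, with one lone trailing item emitted after the loop; no boolean state and no parity test exist.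
import Mathlib
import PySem

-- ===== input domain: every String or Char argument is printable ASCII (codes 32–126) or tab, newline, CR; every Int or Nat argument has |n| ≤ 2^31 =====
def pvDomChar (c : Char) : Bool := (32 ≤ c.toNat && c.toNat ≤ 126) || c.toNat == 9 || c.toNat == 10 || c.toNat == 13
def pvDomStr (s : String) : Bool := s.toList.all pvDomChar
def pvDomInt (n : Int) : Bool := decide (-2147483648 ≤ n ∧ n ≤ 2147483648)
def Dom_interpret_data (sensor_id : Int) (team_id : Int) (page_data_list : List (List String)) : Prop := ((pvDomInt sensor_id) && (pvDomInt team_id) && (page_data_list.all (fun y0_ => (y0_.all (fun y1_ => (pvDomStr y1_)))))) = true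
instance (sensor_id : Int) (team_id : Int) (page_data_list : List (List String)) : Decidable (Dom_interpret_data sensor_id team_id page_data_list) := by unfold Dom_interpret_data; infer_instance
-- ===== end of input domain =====

-- header: B flattens the pages once and consumes the data TWO at a time, emitting the '%i'/'%f' pair per step (no toggle, no parity); alternative decomposition, same cost.

-- ===== PORT A =====
def pvStepA (st : List String × Bool) (data : String) : List String × Bool :=
  if st.2 then (st.1 ++ ["%i" ++ data], false) else (st.1 ++ ["%f" ++ data], true)

def interpret_data (sensor_id : Int) (team_id : Int) (page_data_list : List (List String)) : List String :=
  (page_data_list.foldl (fun st page => page.foldl pvStepA st) ([], true)).1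

-- ===== PORT B =====
-- the while loop of Source B consumes two items per step; ported as two-at-a-time recursion
def pvPairs : List String → List String
  | [] => []
  | [a] => ["%i" ++ a]
  | a :: b :: rest => ("%i" ++ a) :: ("%f" ++ b) :: pvPairs rest

def interpret_data_alt (sensor_id : Int) (team_id : Int) (page_data_list : List (List String)) : List String :=
  pvPairs page_data_list.flatten

-- ===== PRECONDITION & SPEC =====
def Spec_interpret_data (sensor_id : Int) (team_id : Int) (page_data_list : List (List String)) (out : List String) : Prop := out = interpret_data_alt sensor_id team_id page_data_list
instance (sensor_id : Int) (team_id : Int) (page_data_list : List (List String)) (out : List String) : Decidable (Spec_interpret_data sensor_id team_id page_data_list out) := by unfold Spec_interpret_data; infer_instance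

-- ===== CLAIM =====
def Claim_equal_interpret_data : Prop := ∀ (sensor_id : Int) (team_id : Int) (page_data_list : List (List String)), Dom_interpret_data sensor_id team_id page_data_list → Spec_interpret_data sensor_id team_id page_data_list (interpret_data sensor_id team_id page_data_list)

-- ===== LEMMAS AND PROOFS =====
theorem pvFoldTrue (l : List String) (acc : List String) :
    l.foldl pvStepA (acc, true) = (acc ++ pvPairs l, (l.length % 2 == 0 : Bool)) := by
  induction l using pvPairs.induct generalizing acc with
  | case1 => simp [pvPairs]
  | case2 a => simp [pvPairs, pvStepA]
  | case3 a b rest ih =>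
    simp only [List.foldl_cons, pvStepA, if_true, Bool.false_eq_true, if_false]
    rw [ih]
    simp [pvPairs]
    omega

theorem pvFoldlPages (pdl : List (List String)) (st : List String × Bool) :
    pdl.foldl (fun st page => page.foldl pvStepA st) st = pdl.flatten.foldl pvStepA st := by
  induction pdl generalizing st with
  | nil => rfl
  | cons p ps ih => simp [List.flatten_cons, List.foldl_append, ih]

-- ===== VERDICT =====
theorem interpret_data_spec : Claim_equal_interpret_data := by
  intro sensor_id team_id pdl _
  show interpret_data sensor_id team_id pdl = interpret_data_alt sensor_id team_id pdl
  simp [interpret_data, interpret_data_alt, pvFoldlPages, pvFoldTrue]
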